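-- pv_equiv track=rewrite | github.com/vtw-developers/PiREL | backend/duoglotcore-server/p_llm_val.py | _has_repeating_tokens
-- ===== SOURCE A (Python) =====
-- from typing import List, Tuple, Union, Dict
--
-- def _has_repeating_tokens(sp1_tokens: Dict[int, List[str]], sp2_tokens: Dict[int, List[str]]) -> bool:
--   '''
--   sp_tokens = {
--     node_id: List[token]
--   }
--   '''
--   def __has_repeating_tokens(sp_tokens: Dict[int, List[str]]) -> bool:
--     # NOTE check the node itself for repeating tokens
--     # uncomment if this feature is not needed
--     for node_id, tokens in sp_tokens.items():
--       if len(tokens) != len(set(tokens)):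
--         return True
--
--     node_ids = list(sp_tokens.keys())
--     # iterate over pairs of tokens lists
--     for i in range(0, len(node_ids) - 1):
--       for j in range(i + 1, len(node_ids)):
--         # check if any token from the first list appears in other lists
--         for token in sp_tokens[node_ids[i]]:
--           if token in sp_tokens[node_ids[j]]:
--             return True
--     return False
--   return __has_repeating_tokens(sp1_tokens) or __has_repeating_tokens(sp2_tokens)
-- ===== SOURCE B (Python) =====
-- from typing import List, Dict
--
-- def _has_repeating_tokens(sp1_tokens: Dict[int, List[str]], sp2_tokens: Dict[int, List[str]]) -> bool:
--   def helper(sp_tokens: Dict[int, List[str]]) -> bool: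
--     all_tokens = [t for ts in sp_tokens.values() for t in ts]
--     return len(all_tokens) != len(set(all_tokens))
--   return helper(sp1_tokens) or helper(sp2_tokens)
-- ===== Notes on version B (the rewrite author's own statement) =====
-- stated objective: simpler
-- what changed: Replaces A's per-node set-length check plus triple-nested cross-node membership scans with one flatten of all token lists and a single global distinct-count comparison.
import Mathlib
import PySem

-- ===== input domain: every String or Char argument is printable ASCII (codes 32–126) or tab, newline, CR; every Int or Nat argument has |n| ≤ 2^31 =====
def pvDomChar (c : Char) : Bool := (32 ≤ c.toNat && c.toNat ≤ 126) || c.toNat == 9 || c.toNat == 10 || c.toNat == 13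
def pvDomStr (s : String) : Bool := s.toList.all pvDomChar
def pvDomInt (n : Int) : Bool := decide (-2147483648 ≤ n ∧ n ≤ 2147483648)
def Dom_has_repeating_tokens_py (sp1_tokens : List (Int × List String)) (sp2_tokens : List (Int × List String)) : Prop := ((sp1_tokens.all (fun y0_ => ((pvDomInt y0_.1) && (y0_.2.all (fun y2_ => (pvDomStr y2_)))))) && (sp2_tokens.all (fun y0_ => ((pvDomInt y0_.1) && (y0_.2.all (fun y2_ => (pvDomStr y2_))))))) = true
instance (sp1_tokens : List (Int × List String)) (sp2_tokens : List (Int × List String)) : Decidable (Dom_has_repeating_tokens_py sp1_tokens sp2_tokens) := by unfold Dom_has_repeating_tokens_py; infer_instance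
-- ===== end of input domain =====

-- B replaces A's per-node checks and triple-nested cross-node scans by flattening all token lists once and comparing the total count with the global distinct count; equivalence proved on association lists with distinct keys.

-- ===== PORT A =====
-- helper __has_repeating_tokens of A, step for step
def pvHelperA (sp : List (Int × List String)) : Bool :=
  -- for node_id, tokens in sp.items(): if len(tokens) != len(set(tokens)): return True
  if sp.any (fun p => !(p.2.length == (PySem.Set.ofList p.2).length)) then true
  else
    -- node_ids = list(sp.keys())
    let node_ids := sp.map (fun p => p.1)
    -- for i in range(0, len(node_ids) - 1): for j in range(i + 1, len(node_ids)): ...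
    (PySem.List.pyRange 0 ((node_ids.length : Int) - 1) 1).any (fun i =>
      (PySem.List.pyRange (i + 1) (node_ids.length : Int) 1).any (fun j =>
        ((PySem.Dict.mk sp).getD (PySem.List.pyGetD node_ids i 0) []).any (fun token =>
          ((PySem.Dict.mk sp).getD (PySem.List.pyGetD node_ids j 0) []).contains token)))

def has_repeating_tokens_py (sp1_tokens : List (Int × List String)) (sp2_tokens : List (Int × List String)) : Bool :=
  pvHelperA sp1_tokens || pvHelperA sp2_tokens

-- ===== PORT B =====
-- helper of B: flatten all token lists once, then one global cardinality comparison
def pvHelperB (sp : List (Int × List String)) : Bool :=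
  let all_tokens := (sp.map (fun p => p.2)).flatten
  !(all_tokens.length == (PySem.Set.ofList all_tokens).length)

def has_repeating_tokens_py_alt (sp1_tokens : List (Int × List String)) (sp2_tokens : List (Int × List String)) : Bool :=
  pvHelperB sp1_tokens || pvHelperB sp2_tokens

-- ===== PRECONDITION & SPEC =====
-- Pre_ excludes association lists with a duplicated key: the Python parameters are dicts, which cannot
-- contain a duplicate key, so such lists do not denote any input of the Python function.
def Pre_has_repeating_tokens_py (sp1_tokens : List (Int × List String)) (sp2_tokens : List (Int × List String)) : Prop :=
  (sp1_tokens.map Prod.fst).Nodup ∧ (sp2_tokens.map Prod.fst).Nodup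
instance (sp1_tokens : List (Int × List String)) (sp2_tokens : List (Int × List String)) : Decidable (Pre_has_repeating_tokens_py sp1_tokens sp2_tokens) := by unfold Pre_has_repeating_tokens_py; infer_instance
def pvWitness_has_repeating_tokens_py : (List (Int × List String)) × (List (Int × List String)) :=
  ([(1, ["a", "b"]), (2, ["c"])], [(0, ["x"])])

def Spec_has_repeating_tokens_py (sp1_tokens : List (Int × List String)) (sp2_tokens : List (Int × List String)) (out : Bool) : Prop := out = has_repeating_tokens_py_alt sp1_tokens sp2_tokens
instance (sp1_tokens : List (Int × List String)) (sp2_tokens : List (Int × List String)) (out : Bool) : Decidable (Spec_has_repeating_tokens_py sp1_tokens sp2_tokens out) := by unfold Spec_has_repeating_tokens_py; infer_instance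

-- ===== CLAIM (what is proved, stated in full; the proofs are below) =====
def Claim_equal_has_repeating_tokens_py : Prop := ∀ (sp1_tokens : List (Int × List String)) (sp2_tokens : List (Int × List String)), Dom_has_repeating_tokens_py sp1_tokens sp2_tokens → Pre_has_repeating_tokens_py sp1_tokens sp2_tokens → Spec_has_repeating_tokens_py sp1_tokens sp2_tokens (has_repeating_tokens_py sp1_tokens sp2_tokens)

-- ===== LEMMAS AND PROOFS =====

-- len(set(l)) == len(l) iff l has no duplicates
theorem pvOfListSublist {a : Type} [BEq a] [LawfulBEq a] (l : List a) : (PySem.Set.ofList l).Sublist l := by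
  induction l using List.reverseRecOn with
  | nil => simp [PySem.Set.ofList_nil]
  | append_singleton xs x ih =>
      rw [PySem.Set.ofList_append_singleton, PySem.Set.add_eq_ite]
      split
      · exact ih.trans (List.sublist_append_left xs [x])
      · exact ih.append (List.Sublist.refl [x])

theorem pvSetLenEq {a : Type} [BEq a] [LawfulBEq a] (l : List a) :
    (l.length == (PySem.Set.ofList l).length) = true ↔ l.Nodup := by
  rw [beq_iff_eq]
  constructor
  · intro h
    have := (pvOfListSublist l).eq_of_length h.symm
    rw [← this]; exact PySem.Set.nodup_ofList l
  · intro h; rw [PySem.Set.ofList_eq_self_of_nodup l h]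

-- helper B detects exactly a duplicate in the flattened token multiset
theorem pvHelperB_iff (sp : List (Int × List String)) :
    pvHelperB sp = true ↔ ¬ ((sp.map (fun p => p.2)).flatten).Nodup := by
  simp only [pvHelperB, Bool.not_eq_true']
  rw [← pvSetLenEq ((sp.map (fun p => p.2)).flatten)]
  simp

-- dict lookup by the i-th key returns the i-th value (distinct keys)
theorem pvLookupKey (sp : List (Int × List String)) (hk : (sp.map Prod.fst).Nodup)
    (i : Nat) (hi : i < sp.length) :
    (PySem.Dict.mk sp).getD ((sp.map Prod.fst)[i]'(by simpa using hi)) [] = (sp[i]'hi).2 := by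
  induction sp generalizing i with
  | nil => exact absurd hi (by simp)
  | cons hd tl ih =>
      obtain ⟨k, v⟩ := hd
      cases i with
      | zero => simp [PySem.Dict.getD, PySem.Dict.get?_mk_cons]
      | succ n =>
          have hn : n < tl.length := by simpa using hi
          have hkey : (((k, v) :: tl).map Prod.fst)[n + 1]'(by simpa using hi) = (tl.map Prod.fst)[n]'(by simpa using hn) := by
            simp
          rw [hkey]
          have hne : k ≠ (tl.map Prod.fst)[n]'(by simpa using hn) := by
            intro h
            have : k ∈ tl.map Prod.fst := h ▸ List.getElem_mem _
            exact (List.nodup_cons.mp (by simpa using hk)).1 this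
          have htl : (tl.map Prod.fst).Nodup := (List.nodup_cons.mp (by simpa using hk)).2
          calc (PySem.Dict.mk ((k, v) :: tl)).getD ((tl.map Prod.fst)[n]'(by simpa using hn)) []
              = (PySem.Dict.mk tl).getD ((tl.map Prod.fst)[n]'(by simpa using hn)) [] := by
                have hne' : k ≠ (tl[n]'hn).1 := by simpa using hne
                simp [PySem.Dict.getD, PySem.Dict.get?_mk_cons, beq_iff_eq, hne']
            _ = (tl[n]'hn).2 := ih htl n hn
            _ = (((k, v) :: tl)[n + 1]'hi).2 := by simp

-- helper A detects exactly a within-node duplicate or a shared token across two nodes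
theorem pvHelperA_iff (sp : List (Int × List String)) (hk : (sp.map Prod.fst).Nodup) :
    pvHelperA sp = true ↔
      (∃ p ∈ sp, ¬ p.2.Nodup) ∨ ¬ (sp.map (fun p => p.2)).Pairwise List.Disjoint := by
  unfold pvHelperA
  by_cases h1 : sp.any (fun p => !(p.2.length == (PySem.Set.ofList p.2).length)) = true
  · rw [if_pos h1]
    simp only [List.any_eq_true, Bool.not_eq_eq_eq_not, Bool.not_true] at h1
    obtain ⟨p, hp, hlen⟩ := h1
    constructor
    · intro _; left
      exact ⟨p, hp, fun hnd => by
        rw [← pvSetLenEq p.2] at hnd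
        rw [hlen] at hnd
        exact Bool.false_ne_true hnd⟩
    · intro _; rfl
  · rw [if_neg h1]
    simp only [List.any_eq_true, Bool.not_eq_eq_eq_not, Bool.not_true, not_exists, not_and] at h1
    have hnodup : ∀ p ∈ sp, p.2.Nodup := by
      intro p hp
      have := h1 p hp
      rw [← pvSetLenEq p.2]
      simpa using this
    have hleft : ¬ (∃ p ∈ sp, ¬ p.2.Nodup) := by
      push_neg; exact hnodup
    simp only [hleft, false_or]
    -- reduce the nested any to an existential over nat indices
    constructor
    · intro h
      simp only [List.any_eq_true, PySem.List.mem_pyRange_one] at h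
      obtain ⟨i, ⟨hi0, hi1⟩, j, ⟨hj0, hj1⟩, tok, htok1, htok2⟩ := h
      set L := sp.map (fun p : Int × List String => p.2) with hL
      have hlen : (sp.map Prod.fst).length = sp.length := by simp
      have hiN : i.toNat < sp.length := by simp at hi1 ⊢; omega
      have hjN : j.toNat < sp.length := by simp at hj1 ⊢; omega
      have hgi : PySem.List.pyGetD (sp.map Prod.fst) i 0 = (sp.map Prod.fst)[i.toNat]'(by simpa using hiN) :=
        PySem.List.pyGetD_eq_getElem _ _ hi0 (by simp only [List.length_map]; omega)
      have hgj : PySem.List.pyGetD (sp.map Prod.fst) j 0 = (sp.map Prod.fst)[j.toNat]'(by simpa using hjN) :=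
        PySem.List.pyGetD_eq_getElem _ _ (by omega) (by simp only [List.length_map]; omega)
      rw [hgi, pvLookupKey sp hk i.toNat hiN] at htok1
      rw [hgj, pvLookupKey sp hk j.toNat hjN] at htok2
      intro hpw
      have hij : i.toNat < j.toNat := by omega
      have hdisj := List.pairwise_iff_getElem.mp hpw i.toNat j.toNat
        (by simpa [hL] using hiN) (by simpa [hL] using hjN) hij
      have h1' : tok ∈ L[i.toNat]'(by simpa [hL] using hiN) := by
        simpa [hL] using htok1
      have h2' : tok ∈ L[j.toNat]'(by simpa [hL] using hjN) := by
        simpa [hL, List.contains_iff_mem] using htok2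
      exact hdisj h1' h2'
    · intro h
      rw [List.pairwise_iff_getElem] at h
      push_neg at h
      obtain ⟨i, j, hi, hj, hij, hnd⟩ := h
      rw [List.Disjoint] at hnd
      push_neg at hnd
      obtain ⟨tok, htok1, htok2⟩ := hnd
      have hiN : i < sp.length := by simpa using hi
      have hjN : j < sp.length := by simpa using hj
      simp only [List.any_eq_true, PySem.List.mem_pyRange_one]
      refine ⟨(i : Int), ⟨by omega, by simp; omega⟩, (j : Int), ⟨by omega, by simp; omega⟩, tok, ?_, ?_⟩
      · have hg : PySem.List.pyGetD (sp.map Prod.fst) (i : Int) 0 = (sp.map Prod.fst)[i]'(by simpa using hiN) := by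
          rw [PySem.List.pyGetD_eq_getElem _ _ (by omega) (by simp only [List.length_map]; omega)]
          simp
        rw [hg, pvLookupKey sp hk i hiN]
        simpa using htok1
      · have hg : PySem.List.pyGetD (sp.map Prod.fst) (j : Int) 0 = (sp.map Prod.fst)[j]'(by simpa using hjN) := by
          rw [PySem.List.pyGetD_eq_getElem _ _ (by omega) (by simp only [List.length_map]; omega)]
          simp
        rw [hg, pvLookupKey sp hk j hjN]
        simpa [List.contains_iff_mem] using htok2

theorem pvHelper_eq (sp : List (Int × List String)) (hk : (sp.map Prod.fst).Nodup) :
    pvHelperA sp = pvHelperB sp := by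
  rw [Bool.eq_iff_iff, pvHelperA_iff sp hk, pvHelperB_iff sp]
  rw [List.nodup_flatten]
  push_neg
  constructor
  · rintro (⟨p, hp, hnd⟩ | hpw)
    · intro hall; exact absurd (hall p.2 (List.mem_map.mpr ⟨p, hp, rfl⟩)) hnd
    · intro _; exact hpw
  · intro h
    by_cases hall : ∀ l ∈ sp.map (fun p => p.2), l.Nodup
    · right; exact h hall
    · left
      push_neg at hall
      obtain ⟨l, hl, hnd⟩ := hall
      obtain ⟨p, hp, rfl⟩ := List.mem_map.mp hl
      exact ⟨p, hp, hnd⟩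

-- ===== VERDICT (by name: the statement is the Claim_ definition above) =====
theorem has_repeating_tokens_py_spec : Claim_equal_has_repeating_tokens_py := by
  intro sp1 sp2 _ hpre
  unfold Spec_has_repeating_tokens_py has_repeating_tokens_py has_repeating_tokens_py_alt
  rw [pvHelper_eq sp1 hpre.1, pvHelper_eq sp2 hpre.2]
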